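-- pv_equiv track=rewrite | github.com/akohen/AdventOfCode | aoc_2024/day14.py | part2
-- ===== SOURCE A (Python) =====
-- import math
--
-- def add(a, b):
--     return (a[0] + b[0], a[1] + b[1])
--
-- def mod(a, b):
--     return (a[0] % b[0], a[1] % b[1])
--
-- def get_safety_score(robots, dimensions):
--     quadrants = [0,0,0,0]
--     for position, _ in robots:
--         if position[0] < dimensions[0] // 2 and position[1] < dimensions[1] // 2:
--             quadrants[0] += 1
--         elif position[0] > dimensions[0] // 2 and position[1] < dimensions[1] // 2:
--             quadrants[1] += 1
--         elif position[0] < dimensions[0] // 2 and position[1] > dimensions[1] // 2: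
--             quadrants[2] += 1
--         elif position[0] > dimensions[0] // 2 and position[1] > dimensions[1] // 2:
--             quadrants[3] += 1
--
--     return math.prod(quadrants)
--
-- def part2(robots, dimensions = (11,7)):
--     positions = robots.copy()
--     for step in range(10000):
--         new_positions = []
--         for position, velocity in positions:
--             new_position = mod(add(position, velocity), dimensions)
--             new_positions.append((new_position, velocity))
--         positions = new_positions
--         new_score = get_safety_score(positions, dimensions)
--         if new_score < 90000000:
--             return step + 1
-- ===== SOURCE B (Python) =====
-- def part2(robots, dimensions=(11, 7)):
--     # Stateless: each robot's position at step s is computed directly from the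
--     # original input, so no running positions list is maintained.
--     w, h = dimensions
--     mx, my = w // 2, h // 2
--     for step in range(1, 10001):
--         q = [0, 0, 0, 0]
--         for (px, py), (vx, vy) in robots:
--             x = (px + step * vx) % w
--             y = (py + step * vy) % h
--             if x != mx and y != my:
--                 q[2 * (y > my) + (x > mx)] += 1
--         if q[0] * q[1] * q[2] * q[3] < 90000000:
--             return step
--     return None
-- ===== Notes on version B (the rewrite author's own statement) =====
-- stated objective: alternative
-- what changed: B drops A's maintained running-positions list and computes each robot's position at step s directly from the original input as (p + s*v) mod dims, and replaces A's four-way if/elif quadrant chain by a single comparison-derived index into the quadrant counters.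
-- outside the precondition, e.g. on part2([((1, 2), (1, 1))], (0, 7)): A raises ZeroDivisionError, B raises ZeroDivisionError
import Mathlib
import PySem

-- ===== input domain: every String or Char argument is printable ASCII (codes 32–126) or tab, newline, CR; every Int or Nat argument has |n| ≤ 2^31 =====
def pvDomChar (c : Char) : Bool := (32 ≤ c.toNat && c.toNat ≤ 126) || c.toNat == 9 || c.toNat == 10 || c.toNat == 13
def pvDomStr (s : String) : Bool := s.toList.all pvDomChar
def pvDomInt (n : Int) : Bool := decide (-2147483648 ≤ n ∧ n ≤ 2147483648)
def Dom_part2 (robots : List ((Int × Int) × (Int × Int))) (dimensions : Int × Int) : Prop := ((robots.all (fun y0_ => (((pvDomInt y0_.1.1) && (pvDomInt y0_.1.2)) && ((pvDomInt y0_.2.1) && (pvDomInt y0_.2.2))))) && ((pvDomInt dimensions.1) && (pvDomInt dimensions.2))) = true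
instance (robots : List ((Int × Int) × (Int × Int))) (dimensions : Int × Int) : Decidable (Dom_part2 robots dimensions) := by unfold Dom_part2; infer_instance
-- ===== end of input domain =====

-- B recomputes each position from the original robots as (p + step*v) mod dims instead of
-- maintaining A's running positions list, and indexes the quadrant counters arithmetically
-- instead of A's if/elif chain (objective: alternative decomposition, same cost).

-- ===== PORT A =====
def pvAdd (a b : Int × Int) : Int × Int := (a.1 + b.1, a.2 + b.2)

def pvMod (a b : Int × Int) : Int × Int := (PySem.Int.mod a.1 b.1, PySem.Int.mod a.2 b.2)

-- get_safety_score: quadrants [q0,q1,q2,q3] kept as a 4-tuple, branches in A's order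
def pvGetSafetyScore (robots : List ((Int × Int) × (Int × Int))) (dimensions : Int × Int) : Int :=
  let quadrants := robots.foldl (fun (q : Int × Int × Int × Int) pr =>
    let position := pr.1
    if position.1 < PySem.Int.floordiv dimensions.1 2 ∧ position.2 < PySem.Int.floordiv dimensions.2 2 then
      (q.1 + 1, q.2.1, q.2.2.1, q.2.2.2)
    else if PySem.Int.floordiv dimensions.1 2 < position.1 ∧ position.2 < PySem.Int.floordiv dimensions.2 2 then
      (q.1, q.2.1 + 1, q.2.2.1, q.2.2.2)
    else if position.1 < PySem.Int.floordiv dimensions.1 2 ∧ PySem.Int.floordiv dimensions.2 2 < position.2 then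
      (q.1, q.2.1, q.2.2.1 + 1, q.2.2.2)
    else if PySem.Int.floordiv dimensions.1 2 < position.1 ∧ PySem.Int.floordiv dimensions.2 2 < position.2 then
      (q.1, q.2.1, q.2.2.1, q.2.2.2 + 1)
    else q) (0, 0, 0, 0)
  quadrants.1 * quadrants.2.1 * quadrants.2.2.1 * quadrants.2.2.2

-- the 'for step in range(10000)' loop, fuel = remaining iterations, step = current counter
def pvLoopA (dimensions : Int × Int) : List ((Int × Int) × (Int × Int)) → Nat → Int → Option Int
  | _, 0, _ => none
  | positions, fuel + 1, step =>
    let newPositions := positions.map (fun pv => (pvMod (pvAdd pv.1 pv.2) dimensions, pv.2))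
    if pvGetSafetyScore newPositions dimensions < 90000000 then some (step + 1)
    else pvLoopA dimensions newPositions fuel (step + 1)

def part2 (robots : List ((Int × Int) × (Int × Int))) (dimensions : Int × Int) : Option Int :=
  pvLoopA dimensions robots 10000 0

-- ===== PORT B =====
-- position of one robot at step s, computed directly from the original input
def pvPosAt (step : Int) (d : Int × Int) (pv : (Int × Int) × (Int × Int)) : Int × Int :=
  (PySem.Int.mod (pv.1.1 + step * pv.2.1) d.1, PySem.Int.mod (pv.1.2 + step * pv.2.2) d.2)

-- quadrant counters via an arithmetic index (q[2*(y>my)+(x>mx)] += 1 when x≠mx and y≠my)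
def pvQuadCounts (positions : List (Int × Int)) (mx my : Int) : Int × Int × Int × Int :=
  positions.foldl (fun (q : Int × Int × Int × Int) p =>
    if p.1 ≠ mx ∧ p.2 ≠ my then
      let i : Nat := (if my < p.2 then 2 else 0) + (if mx < p.1 then 1 else 0)
      if i = 0 then (q.1 + 1, q.2.1, q.2.2.1, q.2.2.2)
      else if i = 1 then (q.1, q.2.1 + 1, q.2.2.1, q.2.2.2)
      else if i = 2 then (q.1, q.2.1, q.2.2.1 + 1, q.2.2.2)
      else (q.1, q.2.1, q.2.2.1, q.2.2.2 + 1)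
    else q) (0, 0, 0, 0)

-- the 'for step in range(1, 10001)' loop
def pvLoopB (robots : List ((Int × Int) × (Int × Int))) (d : Int × Int) (mx my : Int) :
    Nat → Int → Option Int
  | 0, _ => none
  | fuel + 1, step =>
    let q := pvQuadCounts (robots.map (pvPosAt step d)) mx my
    if q.1 * q.2.1 * q.2.2.1 * q.2.2.2 < 90000000 then some step
    else pvLoopB robots d mx my fuel (step + 1)

def part2_alt (robots : List ((Int × Int) × (Int × Int))) (dimensions : Int × Int) : Option Int :=
  pvLoopB robots dimensions (PySem.Int.floordiv dimensions.1 2) (PySem.Int.floordiv dimensions.2 2) 10000 1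

-- ===== PRECONDITION & SPEC =====
-- Pre_ excludes only inputs on which Python A raises ZeroDivisionError: a zero dimension
-- component with at least one robot (with no robots the '%' is never evaluated).
def Pre_part2 (robots : List ((Int × Int) × (Int × Int))) (dimensions : Int × Int) : Prop :=
  robots = [] ∨ (dimensions.1 ≠ 0 ∧ dimensions.2 ≠ 0)
instance (robots : List ((Int × Int) × (Int × Int))) (dimensions : Int × Int) : Decidable (Pre_part2 robots dimensions) := by unfold Pre_part2; infer_instance

def pvWitness_part2 : (List ((Int × Int) × (Int × Int))) × (Int × Int) :=
  ([((1, 2), (1, -1)), ((3, 0), (-2, 1))], (11, 7))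

def Spec_part2 (robots : List ((Int × Int) × (Int × Int))) (dimensions : Int × Int) (out : Option Int) : Prop := out = part2_alt robots dimensions
instance (robots : List ((Int × Int) × (Int × Int))) (dimensions : Int × Int) (out : Option Int) : Decidable (Spec_part2 robots dimensions out) := by unfold Spec_part2; infer_instance

-- ===== CLAIM (what is proved, stated in full; the proofs are below) =====
def Claim_equal_part2 : Prop := ∀ (robots : List ((Int × Int) × (Int × Int))) (dimensions : Int × Int), Dom_part2 robots dimensions → Pre_part2 robots dimensions → Spec_part2 robots dimensions (part2 robots dimensions)

-- ===== LEMMAS AND PROOFS =====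

-- robot with its position advanced to step s (proof-only helper)
def pvPairAt (s : Int) (d : Int × Int) (pv : (Int × Int) × (Int × Int)) : (Int × Int) × (Int × Int) :=
  (pvPosAt s d pv, pv.2)

-- Python's % is fmod; (a.fmod d + b).fmod d = (a + b).fmod d for EVERY d
theorem pv_fmod_add (a b d : Int) : (Int.fmod a d + b).fmod d = (a + b).fmod d := by
  conv_rhs => rw [show a = d * (a.fdiv d) + a.fmod d from (Int.mul_fdiv_add_fmod a d).symm]
  rw [add_assoc, add_comm (d * a.fdiv d), Int.add_mul_fmod_self_left]

theorem pv_mod_add (a b d : Int) :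
    PySem.Int.mod (PySem.Int.mod a d + b) d = PySem.Int.mod (a + b) d := by
  show (Int.fmod a d + b).fmod d = (a + b).fmod d
  exact pv_fmod_add a b d

-- one A-advance of a robot at step s lands it at step s+1
theorem pv_advance_pairAt (s : Int) (d : Int × Int) (pv : (Int × Int) × (Int × Int)) :
    (pvMod (pvAdd (pvPairAt s d pv).1 (pvPairAt s d pv).2) d, (pvPairAt s d pv).2)
      = pvPairAt (s + 1) d pv := by
  simp only [pvPairAt, pvPosAt, pvMod, pvAdd, pv_mod_add]
  ring_nf

theorem pv_advance_map (s : Int) (d : Int × Int) (robots : List ((Int × Int) × (Int × Int))) :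
    (robots.map (pvPairAt s d)).map (fun pv => (pvMod (pvAdd pv.1 pv.2) d, pv.2))
      = robots.map (pvPairAt (s + 1) d) := by
  rw [List.map_map]
  exact List.map_congr_left (fun pv _ => pv_advance_pairAt s d pv)

-- the very first A-advance, from the raw robots, lands each robot at step 1
theorem pv_advance_init (d : Int × Int) (robots : List ((Int × Int) × (Int × Int))) :
    robots.map (fun pv => (pvMod (pvAdd pv.1 pv.2) d, pv.2)) = robots.map (pvPairAt 1 d) := by
  refine List.map_congr_left (fun pv _ => ?_)
  simp [pvPairAt, pvPosAt, pvMod, pvAdd]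

-- the two per-robot counter updates agree
theorem pv_step_eq (mx my : Int) (q : Int × Int × Int × Int) (p : Int × Int) :
    (if p.1 < mx ∧ p.2 < my then (q.1 + 1, q.2.1, q.2.2.1, q.2.2.2)
     else if mx < p.1 ∧ p.2 < my then (q.1, q.2.1 + 1, q.2.2.1, q.2.2.2)
     else if p.1 < mx ∧ my < p.2 then (q.1, q.2.1, q.2.2.1 + 1, q.2.2.2)
     else if mx < p.1 ∧ my < p.2 then (q.1, q.2.1, q.2.2.1, q.2.2.2 + 1)
     else q)
    = (if p.1 ≠ mx ∧ p.2 ≠ my then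
         let i : Nat := (if my < p.2 then 2 else 0) + (if mx < p.1 then 1 else 0)
         if i = 0 then (q.1 + 1, q.2.1, q.2.2.1, q.2.2.2)
         else if i = 1 then (q.1, q.2.1 + 1, q.2.2.1, q.2.2.2)
         else if i = 2 then (q.1, q.2.1, q.2.2.1 + 1, q.2.2.2)
         else (q.1, q.2.1, q.2.2.1, q.2.2.2 + 1)
       else q) := by
  split_ifs <;> simp_all <;> omega

-- two folds with pointwise-equal step functions agree
theorem pv_foldl_fun_congr {α β : Type} (f g : α → β → α) (h : ∀ a b, f a b = g a b)
    (init : α) (l : List β) : List.foldl f init l = List.foldl g init l := by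
  have hfg : f = g := funext fun a => funext (h a)
  rw [hfg]

-- A's safety score over (position, velocity) pairs equals B's over the bare positions
theorem pv_score_eq (robots : List ((Int × Int) × (Int × Int))) (d : Int × Int) :
    pvGetSafetyScore robots d
      = (pvQuadCounts (robots.map Prod.fst) (PySem.Int.floordiv d.1 2) (PySem.Int.floordiv d.2 2)).1
        * (pvQuadCounts (robots.map Prod.fst) (PySem.Int.floordiv d.1 2) (PySem.Int.floordiv d.2 2)).2.1
        * (pvQuadCounts (robots.map Prod.fst) (PySem.Int.floordiv d.1 2) (PySem.Int.floordiv d.2 2)).2.2.1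
        * (pvQuadCounts (robots.map Prod.fst) (PySem.Int.floordiv d.1 2) (PySem.Int.floordiv d.2 2)).2.2.2 := by
  simp only [pvGetSafetyScore, pvQuadCounts, List.foldl_map]
  refine congrArg (fun t : Int × Int × Int × Int => t.1 * t.2.1 * t.2.2.1 * t.2.2.2) ?_
  exact pv_foldl_fun_congr _ _ (fun (q : Int × Int × Int × Int) (pr : (Int × Int) × (Int × Int)) => pv_step_eq _ _ q pr.1) _ _

-- the loops agree once A's next advance is characterised
theorem pv_loop_eq (robots : List ((Int × Int) × (Int × Int))) (d : Int × Int) :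
    ∀ (fuel : Nat) (s : Int) (ps : List ((Int × Int) × (Int × Int))),
      ps.map (fun pv => (pvMod (pvAdd pv.1 pv.2) d, pv.2)) = robots.map (pvPairAt (s + 1) d) →
      pvLoopA d ps fuel s
        = pvLoopB robots d (PySem.Int.floordiv d.1 2) (PySem.Int.floordiv d.2 2) fuel (s + 1) := by
  intro fuel
  induction fuel with
  | zero => intro s ps _; rfl
  | succ n ih =>
    intro s ps h
    show (if pvGetSafetyScore (ps.map _) d < 90000000 then some (s + 1)
          else pvLoopA d (ps.map _) n (s + 1)) = _
    rw [h, pv_score_eq]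
    have hfst : (robots.map (pvPairAt (s + 1) d)).map Prod.fst
        = robots.map (pvPosAt (s + 1) d) := by
      rw [List.map_map]; rfl
    rw [hfst]
    show _ = (if (pvQuadCounts (robots.map (pvPosAt (s + 1) d)) _ _).1 * _ * _ * _ < 90000000
          then some (s + 1)
          else pvLoopB robots d (PySem.Int.floordiv d.1 2) (PySem.Int.floordiv d.2 2) n (s + 1 + 1))
    split_ifs with hc
    · rfl
    · exact ih (s + 1) _ (pv_advance_map (s + 1) d robots)

-- ===== VERDICT (by name: the statement is the Claim_ definition above) =====
theorem part2_spec : Claim_equal_part2 := by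
  intro robots dimensions _ _
  unfold Spec_part2 part2 part2_alt
  exact pv_loop_eq robots dimensions 10000 0
    robots (by rw [pv_advance_init]; norm_num)
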